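-- pv_equiv track=rewrite | github.com/Gayang2902/boj | implementation/28214.py | solution
-- ===== SOURCE A (Python) =====
-- def solution(N, K, P, is_cream):
--     f = 0
--     l = K
--     rst = 0
--     for _ in range(N):
--         cnt = K - sum(is_cream[f:l])
--         if cnt < P:
--             rst += 1
--         f = l
--         l += K
--
--     return rst
-- ===== SOURCE B (Python) =====
-- def solution(N, K, P, is_cream):
--     n = len(is_cream)
--     pref = [0] * (n + 1)
--     for i, v in enumerate(is_cream):
--         pref[i + 1] = pref[i] + v
--     rst = 0
--     for j in range(N):
--         a = min(j * K, n)
--         b = min(j * K + K, n)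
--         if K - (pref[b] - pref[a]) < P:
--             rst += 1
--     return rst
-- ===== Notes on version B (the rewrite author's own statement) =====
-- stated objective: alternative
-- what changed: B builds a prefix-sum table of is_cream in a separate pass and computes each block's cream count as a difference of two table lookups indexed by j*K, instead of A's per-block slice-and-sum over accumulated (f, l) state; Pre_ restricts K, the block length, to be non-negative — the task's natural domain — where the prefix-difference and the slice-sum coincide.
-- outside the precondition, e.g. on solution(1, -1, -1, [0, 1]): A returns 0, B returns 1
import Mathlib
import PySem

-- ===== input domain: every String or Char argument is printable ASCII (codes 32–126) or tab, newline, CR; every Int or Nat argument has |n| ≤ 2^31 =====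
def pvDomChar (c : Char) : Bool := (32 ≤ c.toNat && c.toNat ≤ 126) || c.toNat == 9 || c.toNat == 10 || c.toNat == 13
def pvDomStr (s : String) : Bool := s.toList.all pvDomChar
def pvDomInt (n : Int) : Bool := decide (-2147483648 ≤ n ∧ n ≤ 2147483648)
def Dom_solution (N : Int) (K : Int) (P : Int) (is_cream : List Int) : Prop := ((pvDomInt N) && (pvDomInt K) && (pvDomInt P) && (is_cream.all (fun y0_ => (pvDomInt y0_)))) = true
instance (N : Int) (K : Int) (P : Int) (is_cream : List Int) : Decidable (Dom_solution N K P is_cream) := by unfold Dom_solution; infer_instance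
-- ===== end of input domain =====

-- B replaces the per-block slice-and-sum by a prefix-sum table built once and indexed per block (alternative two-phase decomposition; Pre_ restricts to the natural domain K ≥ 0).

-- ===== PORT A =====
-- literal transliteration of A: state (f, l, rst), each step sums the slice is_cream[f:l]
def solution (N : Int) (K : Int) (P : Int) (is_cream : List Int) : Int :=
  let st := (PySem.List.pyRange 0 N 1).foldl
    (fun (st : Int × Int × Int) _ =>
      let f := st.1
      let l := st.2.1
      let rst := st.2.2
      let cnt := K - (PySem.List.slice is_cream (some f) (some l)).sum
      let rst := if cnt < P then rst + 1 else rst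
      (l, l + K, rst))
    (0, K, 0)
  st.2.2

-- ===== PORT B =====
-- prefix-sum table of is_cream, built in one pass (pref[i] = sum of the first i elements)
def prefSums (acc : Int) : List Int → List Int
  | [] => [acc]
  | x :: xs => acc :: prefSums (acc + x) xs

def solution_alt (N : Int) (K : Int) (P : Int) (is_cream : List Int) : Int :=
  let n : Int := is_cream.length
  let pref := prefSums 0 is_cream
  (PySem.List.pyRange 0 N 1).foldl
    (fun rst j =>
      let a := min (j * K) n
      let b := min (j * K + K) n
      if K - (PySem.List.pyGetD pref b 0 - PySem.List.pyGetD pref a 0) < P then rst + 1 else rst)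
    0

-- ===== PRECONDITION & SPEC =====
-- Pre_ restricts K, the block length, to be non-negative: the task's natural domain (A still
-- returns on negative K; an excluded example is in the claim's cites).
def Pre_solution (N : Int) (K : Int) (P : Int) (is_cream : List Int) : Prop := 0 ≤ K
instance (N : Int) (K : Int) (P : Int) (is_cream : List Int) : Decidable (Pre_solution N K P is_cream) := by unfold Pre_solution; infer_instance
def pvWitness_solution : Int × Int × Int × List Int := (3, 2, 1, [1, 0, 0, 1, 1, 0])

def Spec_solution (N : Int) (K : Int) (P : Int) (is_cream : List Int) (out : Int) : Prop := out = solution_alt N K P is_cream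
instance (N : Int) (K : Int) (P : Int) (is_cream : List Int) (out : Int) : Decidable (Spec_solution N K P is_cream out) := by unfold Spec_solution; infer_instance

-- ===== CLAIM (what is proved, stated in full; the proofs are below) =====
def Claim_equal_solution : Prop := ∀ (N : Int) (K : Int) (P : Int) (is_cream : List Int), Dom_solution N K P is_cream → Pre_solution N K P is_cream → Spec_solution N K P is_cream (solution N K P is_cream)

-- ===== LEMMAS AND PROOFS =====

-- pref-table lookup is a take-sum
theorem prefSums_getD (acc : Int) (xs : List Int) (k : Nat) (hk : k ≤ xs.length) :
    (prefSums acc xs).getD k 0 = acc + (xs.take k).sum := by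
  induction xs generalizing acc k with
  | nil =>
    simp only [List.length_nil, Nat.le_zero] at hk
    simp [hk, prefSums]
  | cons x xs ih =>
    cases k with
    | zero => simp [prefSums]
    | succ k =>
      simp only [prefSums, List.getD_cons_succ, List.take_succ_cons, List.sum_cons]
      rw [ih _ _ (by simpa using hk)]; ring

theorem prefSums_pyGetD (xs : List Int) (i : Int) (h0 : 0 ≤ i) (hn : i ≤ xs.length) :
    PySem.List.pyGetD (prefSums 0 xs) i 0 = (xs.take i.toNat).sum := by
  rw [PySem.List.pyGetD_of_nonneg _ _ h0, prefSums_getD 0 xs i.toNat (by omega)]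
  simp

-- sum of a drop-take segment as a difference of take-sums
theorem sum_drop_take (xs : List Int) (a m : Nat) :
    ((xs.drop a).take m).sum = (xs.take (a + m)).sum - (xs.take a).sum := by
  rw [List.take_add, List.sum_append]; ring

-- the per-step value A computes equals the one B computes (0 ≤ f ≤ l)
theorem slice_sum_eq (xs : List Int) (f l : Int) (hf : 0 ≤ f) (hfl : f ≤ l) :
    (PySem.List.slice xs (some f) (some l)).sum =
      PySem.List.pyGetD (prefSums 0 xs) (min l (xs.length : Int)) 0
        - PySem.List.pyGetD (prefSums 0 xs) (min f (xs.length : Int)) 0 := by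
  have hslice : PySem.List.slice xs (some f) (some l)
      = (xs.drop (PySem.List.clampIdx xs.length f)).take
          (PySem.List.clampIdx xs.length l - PySem.List.clampIdx xs.length f) := rfl
  have ha : PySem.List.clampIdx xs.length f = (min f (xs.length : Int)).toNat := by
    simp only [PySem.List.clampIdx]; split_ifs <;> omega
  have hb : PySem.List.clampIdx xs.length l = (min l (xs.length : Int)).toNat := by
    simp only [PySem.List.clampIdx]; split_ifs <;> omega
  rw [hslice, ha, hb, sum_drop_take]
  rw [prefSums_pyGetD xs _ (by omega) (by omega), prefSums_pyGetD xs _ (by omega) (by omega)]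
  have : (min f (xs.length : Int)).toNat + ((min l (xs.length : Int)).toNat - (min f (xs.length : Int)).toNat)
      = (min l (xs.length : Int)).toNat := by omega
  rw [this]

-- the two loops agree: A's state after s steps is (s*K, s*K+K, rst)
theorem loop_eq (K P : Int) (xs : List Int) (N : Int) (hK : 0 ≤ K) :
    ∀ (s rst : Int), 0 ≤ s →
      ((PySem.List.pyRange s N 1).foldl
        (fun (st : Int × Int × Int) _ =>
          let f := st.1
          let l := st.2.1
          let rst := st.2.2
          let cnt := K - (PySem.List.slice xs (some f) (some l)).sum
          let rst := if cnt < P then rst + 1 else rst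
          (l, l + K, rst))
        (s * K, s * K + K, rst)).2.2 =
      (PySem.List.pyRange s N 1).foldl
        (fun rst j =>
          let a := min (j * K) (xs.length : Int)
          let b := min (j * K + K) (xs.length : Int)
          if K - (PySem.List.pyGetD (prefSums 0 xs) b 0 - PySem.List.pyGetD (prefSums 0 xs) a 0) < P then rst + 1 else rst)
        rst := by
  intro s rst hs
  by_cases h : s < N
  · rw [PySem.List.pyRange_one_cons h]
    simp only [List.foldl_cons]
    rw [slice_sum_eq xs (s * K) (s * K + K) (by positivity) (by omega)]
    have harith : s * K + K = (s + 1) * K := by ring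
    have hstep := loop_eq K P xs N hK (s + 1)
      (if K - (PySem.List.pyGetD (prefSums 0 xs) (min (s * K + K) (xs.length : Int)) 0
          - PySem.List.pyGetD (prefSums 0 xs) (min (s * K) (xs.length : Int)) 0) < P then rst + 1 else rst)
      (by omega)
    simp only [harith] at hstep ⊢
    exact hstep
  · have : PySem.List.pyRange s N 1 = [] := by
      rw [PySem.List.pyRange_one]
      have : (N - s).toNat = 0 := by omega
      simp [this]
    simp [this]
termination_by s => (N - s).toNat
decreasing_by omega

-- ===== VERDICT (by name: the statement is the Claim_ definition above) =====
theorem solution_spec : Claim_equal_solution := by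
  intro N K P is_cream _ hK
  show solution N K P is_cream = solution_alt N K P is_cream
  unfold solution solution_alt
  have h := loop_eq K P is_cream N hK 0 0 le_rfl
  simpa using h
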